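-- pv_equiv track=rewrite | github.com/tarkansarim/OneTrainer-FluxDe-DistilledSupport- | modules/dataLoader/pipelineModules/CropCaptionGenerator.py | _select_manifest_model
-- ===== SOURCE A (Python) =====
-- from typing import Any, Dict, Iterable, List, Optional, Tuple
--
-- def _select_manifest_model(requested: str, available: List[str]) -> Optional[str]:
--     def _normalize(name: str) -> str:
--         return ''.join(ch for ch in name.lower() if ch.isalnum())
--
--     norm_requested = _normalize(requested)
--     candidates: List[Tuple[str, str]] = []
--     for name in available:
--         norm_name = _normalize(name)
--         if norm_name == norm_requested:
--             return name
--         if norm_name.startswith(norm_requested) or norm_requested.startswith(norm_name):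
--             candidates.append((norm_name, name))
--
--     if not candidates:
--         return None
--
--     candidates.sort(key=lambda item: (len(item[0]), item[1]))
--     return candidates[0][1]
-- ===== SOURCE B (Python) =====
-- from typing import List, Optional
--
--
-- def _select_manifest_model(requested: str, available: List[str]) -> Optional[str]:
--     def _normalize(name: str) -> str:
--         return ''.join(ch for ch in name.lower() if ch.isalnum())
--
--     norm_requested = _normalize(requested)
--
--     # Group the names by their normalized form in one pass: for each distinct
--     # normalized key remember the FIRST name that produced it (exact-match
--     # answer) and the lexicographically SMALLEST name (candidate answer).
--     index = {}
--     for name in available: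
--         key = _normalize(name)
--         if key in index:
--             first, best = index[key]
--             index[key] = (first, min(best, name))
--         else:
--             index[key] = (name, name)
--
--     # Exact match is a single hash lookup instead of a scan.
--     hit = index.get(norm_requested)
--     if hit is not None:
--         return hit[0]
--
--     # Prefix-related keys: one test per DISTINCT normalized form.
--     candidates = [(len(key), best) for key, (_, best) in index.items()
--                   if key.startswith(norm_requested) or norm_requested.startswith(key)]
--     if not candidates:
--         return None
--     return min(candidates)[1]
-- ===== Notes on version B (the rewrite author's own statement) =====
-- stated objective: alternative
-- what changed: Replaces A's scan that early-returns on exact match while accumulating all prefix-related (norm, name) pairs and then sorts them, with a dict index built in one grouping pass keyed by normalized form (storing the first and the lexicographically smallest name per key), so the exact match becomes a single hash lookup and the candidate minimum is taken over the distinct normalized keys instead of over all names.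
import Mathlib
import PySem

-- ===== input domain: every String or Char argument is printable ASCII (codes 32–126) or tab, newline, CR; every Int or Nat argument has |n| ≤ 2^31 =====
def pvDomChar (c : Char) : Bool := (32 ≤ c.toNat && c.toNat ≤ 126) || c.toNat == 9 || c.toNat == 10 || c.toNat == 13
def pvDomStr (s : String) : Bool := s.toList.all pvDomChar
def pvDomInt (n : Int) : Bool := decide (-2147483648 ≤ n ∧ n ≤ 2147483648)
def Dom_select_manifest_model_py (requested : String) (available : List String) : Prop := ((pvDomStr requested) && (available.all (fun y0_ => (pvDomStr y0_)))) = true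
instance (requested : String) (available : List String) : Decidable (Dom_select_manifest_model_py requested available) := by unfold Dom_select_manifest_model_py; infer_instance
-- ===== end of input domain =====

-- B replaces A's scan-and-sort with a hash index grouped by normalized form (first name and
-- minimal name per distinct key), a direct lookup for the exact match and a min over the
-- distinct keys; equal return values are proved on all inputs.

-- ===== PORT A =====
-- _normalize: lowercase, keep only alphanumeric characters (kept as List Char)
def pvNormalize (s : String) : List Char :=
  (PySem.Chars.lower s.toList).filter PySem.Chars.isalnum

-- the bidirectional prefix test both Pythons spell out
def pvRel (nr k : List Char) : Bool :=
  PySem.Chars.startswith k nr || PySem.Chars.startswith nr k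

-- the for-loop of A: early return on exact match, else accumulate prefix-related candidates,
-- finally `if not candidates: return None` / sort by (len(norm), name) / return first
def pvALoop (nr : List Char) (names : List String) (cands : List (List Char × String)) : Option String :=
  match names with
  | [] =>
    match PySem.List.sorted2 cands (fun p => p.1.length) (fun p => p.2) with
    | [] => none
    | c :: _ => some c.2
  | n :: rest =>
    let nn := pvNormalize n
    if nn = nr then some n
    else if pvRel nr nn then
      pvALoop nr rest (cands ++ [(nn, n)])
    else
      pvALoop nr rest cands

def select_manifest_model_py (requested : String) (available : List String) : Option String :=
  pvALoop (pvNormalize requested) available []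

-- ===== PORT B =====
-- one grouping pass: index[key] = (first name with this normalized key, min name with it)
def pvVal (d : PySem.Dict (List Char) (String × String)) (name : String) : String × String :=
  match d.get? (pvNormalize name) with
  | some fb => (fb.1, min fb.2 name)
  | none => (name, name)

def pvStep (d : PySem.Dict (List Char) (String × String)) (name : String) :
    PySem.Dict (List Char) (String × String) :=
  d.insert (pvNormalize name) (pvVal d name)

def select_manifest_model_py_alt (requested : String) (available : List String) : Option String :=
  let nr := pvNormalize requested
  let index := available.foldl pvStep PySem.Dict.empty
  match index.get? nr with
  | some hit => some hit.1
  | none =>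
    let candidates := (index.items.filter (fun p => pvRel nr p.1)).map
        (fun p => (p.1.length, p.2.2))
    match PySem.List.min2? candidates Prod.fst Prod.snd with
    | none => none
    | some c => some c.2

-- ===== PRECONDITION & SPEC =====
def Spec_select_manifest_model_py (requested : String) (available : List String) (out : Option String) : Prop := out = select_manifest_model_py_alt requested available
instance (requested : String) (available : List String) (out : Option String) : Decidable (Spec_select_manifest_model_py requested available out) := by unfold Spec_select_manifest_model_py; infer_instance

-- ===== CLAIM (what is proved, stated in full; the proofs are below) =====
def Claim_equal_select_manifest_model_py : Prop := ∀ (requested : String) (available : List String), Dom_select_manifest_model_py requested available → Spec_select_manifest_model_py requested available (select_manifest_model_py requested available)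

-- ===== LEMMAS AND PROOFS =====

-- ---- proof-only abbreviations ----

-- all names of `available` whose normalized form is k (A visits them in this order)
def pvGroup (available : List String) (k : List Char) : List String :=
  available.filter (fun n => decide (pvNormalize n = k))

-- A's candidate list
def pvCands (nr : List Char) (available : List String) : List (List Char × String) :=
  (available.filter (fun n => pvRel nr (pvNormalize n))).map (fun n => (pvNormalize n, n))

-- the lexicographic (Nat key, String key) order both minimum computations use
def pvLe {α : Type} (k1 : α → Nat) (k2 : α → String) (x y : α) : Prop :=
  k1 x < k1 y ∨ (k1 x = k1 y ∧ k2 x ≤ k2 y)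

lemma pvLe_refl {α : Type} (k1 : α → Nat) (k2 : α → String) (x : α) : pvLe k1 k2 x x :=
  Or.inr ⟨rfl, le_refl _⟩

lemma pvLe_trans {α : Type} (k1 : α → Nat) (k2 : α → String) {x y z : α}
    (h1 : pvLe k1 k2 x y) (h2 : pvLe k1 k2 y z) : pvLe k1 k2 x z := by
  rcases h1 with h1 | ⟨h1, h1'⟩ <;> rcases h2 with h2 | ⟨h2, h2'⟩
  · exact Or.inl (h1.trans h2)
  · exact Or.inl (h2 ▸ h1)
  · exact Or.inl (h1 ▸ h2)
  · exact Or.inr ⟨h1.trans h2, h1'.trans h2'⟩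

-- ---- min2? with a (Nat, String) key: first minimum, characterised ----

lemma pvMin2_fold_inv {α : Type} (k1 : α → Nat) (k2 : α → String) (t : List α) (a : α) :
    ∃ m, t.foldl (fun acc x =>
        match acc with
        | none => some x
        | some m => if (decide (k1 x < k1 m) || !decide (k1 m < k1 x) && decide (k2 x < k2 m)) = true
                    then some x else some m) (some a) = some m ∧
      (m = a ∨ m ∈ t) ∧ pvLe k1 k2 m a ∧ ∀ y ∈ t, pvLe k1 k2 m y := by
  induction t generalizing a with
  | nil => exact ⟨a, rfl, Or.inl rfl, pvLe_refl _ _ _, by simp⟩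
  | cons x t ih =>
    simp only [List.foldl_cons]
    by_cases hc : (decide (k1 x < k1 a) || !decide (k1 a < k1 x) && decide (k2 x < k2 a)) = true
    · rw [if_pos hc]
      obtain ⟨m, hm, hmem, hma, hall⟩ := ih x
      have hxa : pvLe k1 k2 x a := by
        simp only [Bool.or_eq_true, Bool.and_eq_true, Bool.not_eq_true', decide_eq_true_eq,
          decide_eq_false_iff_not] at hc
        rcases hc with h | ⟨h1, h2⟩
        · exact Or.inl h
        · by_cases hlt : k1 x < k1 a
          · exact Or.inl hlt
          · exact Or.inr ⟨by omega, le_of_lt h2⟩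
      refine ⟨m, hm, ?_, pvLe_trans _ _ hma hxa, ?_⟩
      · rcases hmem with rfl | h
        · exact Or.inr (by simp)
        · exact Or.inr (by simp [h])
      · intro y hy
        rcases List.mem_cons.mp hy with rfl | hy
        · exact hma
        · exact hall y hy
    · rw [if_neg hc]
      obtain ⟨m, hm, hmem, hma, hall⟩ := ih a
      have hax : pvLe k1 k2 a x := by
        simp only [Bool.or_eq_true, Bool.and_eq_true, Bool.not_eq_true', decide_eq_true_eq,
          decide_eq_false_iff_not, not_or, not_and] at hc
        obtain ⟨h1, h2⟩ := hc
        by_cases hlt : k1 a < k1 x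
        · exact Or.inl hlt
        · exact Or.inr ⟨by omega, le_of_not_gt (h2 hlt)⟩
      refine ⟨m, hm, ?_, hma, ?_⟩
      · rcases hmem with rfl | h
        · exact Or.inl rfl
        · exact Or.inr (by simp [h])
      · intro y hy
        rcases List.mem_cons.mp hy with rfl | hy
        · exact pvLe_trans _ _ hma hax
        · exact hall y hy

lemma pvMin2_nil {α : Type} (k1 : α → Nat) (k2 : α → String) :
    PySem.List.min2? ([] : List α) k1 k2 = none := rfl

lemma pvMin2_cons {α : Type} (k1 : α → Nat) (k2 : α → String) (x : α) (t : List α) :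
    ∃ m, PySem.List.min2? (x :: t) k1 k2 = some m ∧ (m ∈ x :: t) ∧ ∀ y ∈ x :: t, pvLe k1 k2 m y := by
  obtain ⟨m, hm, hmem, hma, hall⟩ := pvMin2_fold_inv k1 k2 t x
  refine ⟨m, ?_, ?_, ?_⟩
  · simpa [PySem.List.min2?] using hm
  · rcases hmem with h | h
    · simp [h]
    · simp [h]
  · intro y hy
    rcases List.mem_cons.mp hy with rfl | hy
    · exact hma
    · exact hall y hy

lemma pvMin2_spec {α : Type} (k1 : α → Nat) (k2 : α → String) (xs : List α) (m : α)
    (h : PySem.List.min2? xs k1 k2 = some m) : m ∈ xs ∧ ∀ y ∈ xs, pvLe k1 k2 m y := by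
  cases xs with
  | nil => simp [pvMin2_nil] at h
  | cons x t =>
    obtain ⟨m', hm', hmem, hall⟩ := pvMin2_cons k1 k2 x t
    rw [hm'] at h
    cases h
    exact ⟨hmem, hall⟩

lemma pvMin2_eq_none_iff {α : Type} (k1 : α → Nat) (k2 : α → String) (xs : List α) :
    PySem.List.min2? xs k1 k2 = none ↔ xs = [] := by
  cases xs with
  | nil => simp [pvMin2_nil]
  | cons x t =>
    obtain ⟨m', hm', _, _⟩ := pvMin2_cons k1 k2 x t
    simp [hm']

-- a member that is minimal and unique on its key IS the min2?
lemma pvMin2_eq_of {α : Type} (k1 : α → Nat) (k2 : α → String) (xs : List α) (m : α)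
    (hmem : m ∈ xs) (hmin : ∀ y ∈ xs, pvLe k1 k2 m y)
    (huniq : ∀ y ∈ xs, k1 y = k1 m → k2 y = k2 m → y = m) :
    PySem.List.min2? xs k1 k2 = some m := by
  cases xs with
  | nil => simp at hmem
  | cons x t =>
    obtain ⟨m', hm', hmem', hall'⟩ := pvMin2_cons k1 k2 x t
    rw [hm']
    have h1 := hall' m hmem
    have h2 := hmin m' hmem'
    have hk1 : k1 m' = k1 m := by
      rcases h1 with h1 | ⟨h1, _⟩ <;> rcases h2 with h2 | ⟨h2, _⟩ <;> omega
    have hk2 : k2 m' = k2 m := by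
      rcases h1 with h1 | ⟨_, h1⟩ <;> rcases h2 with h2 | ⟨_, h2⟩ <;> first | omega | exact le_antisymm h1 h2
    exact congrArg some (huniq m' hmem' hk1 hk2)

-- ---- the grouping dict, characterised ----

-- one full description of a lookup in the dict the grouping loop builds
lemma pvBuild_get? (l : List String) (d : PySem.Dict (List Char) (String × String)) (k : List Char) :
    (l.foldl pvStep d).get? k =
      match d.get? k with
      | some fb => some (fb.1, (pvGroup l k).foldl min fb.2)
      | none =>
        match pvGroup l k with
        | [] => none
        | n :: rest => some (n, rest.foldl min n) := by
  induction l generalizing d with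
  | nil => cases h : d.get? k <;> simp [pvGroup, h]
  | cons n rest ih =>
    simp only [List.foldl_cons]
    rw [ih]
    by_cases hk : pvNormalize n = k
    · have hstep : (pvStep d n).get? k =
          some (match d.get? k with
                | some fb => (fb.1, min fb.2 n)
                | none => (n, n)) := by
        simp [pvStep, pvVal, hk]
      rw [hstep]
      cases h : d.get? k <;> simp [pvGroup, hk]
    · have hstep : (pvStep d n).get? k = d.get? k := by
        simp [pvStep, PySem.Dict.get?_insert, Ne.symm hk]
      rw [hstep]
      cases h : d.get? k <;> simp [pvGroup, hk]

-- the keys of the built dict are the distinct normalized forms, in first-occurrence order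
lemma pvBuild_keys (l : List String) :
    (l.foldl pvStep PySem.Dict.empty).keys = PySem.Set.ofList (l.map pvNormalize) := by
  have h := PySem.Dict.keys_foldl_insert_key l pvNormalize (fun d n => pvVal d n) PySem.Dict.empty
  have hs : (fun (d : PySem.Dict (List Char) (String × String)) n => d.insert (pvNormalize n) (pvVal d n)) = pvStep := by
    funext d n; rfl
  rw [hs] at h
  rw [h]
  rfl

lemma pvBuild_keys_nodup (l : List String) :
    (l.foldl pvStep PySem.Dict.empty).keys.Nodup := by
  have h := PySem.Dict.nodup_keys_foldl_insert_key l pvNormalize (fun d n => pvVal d n) PySem.Dict.empty (by simp)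
  have hs : (fun (d : PySem.Dict (List Char) (String × String)) n => d.insert (pvNormalize n) (pvVal d n)) = pvStep := by
    funext d n; rfl
  rwa [hs] at h

-- a key of the index: its group is nonempty and the stored pair is (first of group, min of group)
lemma pvKey_info (l : List String) (k : List Char) (hk : pvGroup l k ≠ []) :
    ∃ g₀ grest, pvGroup l k = g₀ :: grest ∧
      (l.foldl pvStep PySem.Dict.empty).get? k = some (g₀, grest.foldl min g₀) := by
  rw [pvBuild_get?, PySem.Dict.get?_empty]
  cases hg : pvGroup l k with
  | nil => exact absurd hg hk
  | cons g₀ grest => exact ⟨g₀, grest, rfl, rfl⟩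

lemma pvGroup_mem (l : List String) (k : List Char) (n : String) :
    n ∈ pvGroup l k ↔ n ∈ l ∧ pvNormalize n = k := by
  simp [pvGroup]

lemma pvCands_mem (nr : List Char) (l : List String) (p : List Char × String) :
    p ∈ pvCands nr l ↔ ∃ n ∈ l, pvRel nr (pvNormalize n) = true ∧ p = (pvNormalize n, n) := by
  simp [pvCands]
  constructor
  · rintro ⟨n, ⟨hn, hr⟩, hp⟩
    exact ⟨n, hn, hr, hp.symm⟩
  · rintro ⟨n, hn, hr, hp⟩
    exact ⟨n, ⟨hn, hr⟩, hp.symm⟩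

-- ---- A's loop, characterised (exact-match scan, else min2? of the candidates) ----

-- head of one insertBy step = one min step
lemma head?_insertBy {α : Type} (before : α → α → Bool) (x : α) (acc : List α) :
    (PySem.List.insertBy before x acc).head? =
      some (match acc.head? with
            | none => x
            | some y => if before x y then x else y) := by
  cases acc with
  | nil => simp [PySem.List.insertBy]
  | cons y ys =>
    by_cases h : before x y <;> simp [PySem.List.insertBy, h]

-- head of an insertion-sort fold is the first minimum under `before`
lemma head?_foldl_insertBy {α : Type} (before : α → α → Bool) (xs acc : List α) :
    (xs.foldl (fun a x => PySem.List.insertBy before x a) acc).head? =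
      xs.foldl (fun m x =>
        match m with
        | none => some x
        | some m => if before x m then some x else some m) acc.head? := by
  induction xs generalizing acc with
  | nil => rfl
  | cons x rest ih =>
    simp only [List.foldl_cons]
    rw [ih, head?_insertBy]
    cases acc with
    | nil => rfl
    | cons y ys => congr 1; exact apply_ite some _ _ _

-- the first element of A's sorted candidate list is min2?
lemma pvSorted2_head (cs : List (List Char × String)) :
    (PySem.List.sorted2 cs (fun p => p.1.length) (fun p => p.2)).head? =
      PySem.List.min2? cs (fun p => p.1.length) (fun p => p.2) := by
  simp only [PySem.List.sorted2, PySem.List.min2?]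
  rw [head?_foldl_insertBy]
  rfl

lemma pvALoop_eq (nr : List Char) (names : List String) (cands : List (List Char × String)) :
    pvALoop nr names cands =
      match names.find? (fun n => decide (pvNormalize n = nr)) with
      | some n => some n
      | none =>
        match PySem.List.min2? (cands ++ pvCands nr names)
            (fun p => p.1.length) (fun p => p.2) with
        | none => none
        | some c => some c.2 := by
  induction names generalizing cands with
  | nil =>
    simp only [pvALoop, List.find?_nil, pvCands, List.filter_nil, List.map_nil, List.append_nil]
    have h := pvSorted2_head cands
    cases hs : PySem.List.sorted2 cands (fun p => p.1.length) (fun p => p.2) with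
    | nil => rw [hs] at h; rw [← h]; rfl
    | cons c cs => rw [hs] at h; rw [← h]; rfl
  | cons n rest ih =>
    simp only [pvALoop, List.find?_cons, pvCands, List.filter_cons]
    by_cases h1 : pvNormalize n = nr
    · simp [h1]
    · by_cases h2 : pvRel nr (pvNormalize n) = true
      · simp only [h1, decide_false, if_false, h2, if_true]
        rw [ih]
        simp [pvCands, List.append_assoc]
      · simp only [h1, decide_false, h2]
        simp only [Bool.false_eq_true, if_false]
        exact ih cands

-- the else branches agree: min over all candidate pairs = min over the per-key minima
lemma pvElse_eq (nr : List Char) (l : List String) :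
    (match PySem.List.min2? (pvCands nr l) (fun p => p.1.length) (fun p => p.2) with
     | none => none
     | some c => some c.2) =
    (match PySem.List.min2?
        (((l.foldl pvStep PySem.Dict.empty).items.filter (fun p => pvRel nr p.1)).map
          (fun p => (p.1.length, p.2.2))) Prod.fst Prod.snd with
     | none => (none : Option String)
     | some c => some c.2) := by
  set d := l.foldl pvStep PySem.Dict.empty with hd
  set C := (d.items.filter (fun p => pvRel nr p.1)).map (fun p => (p.1.length, p.2.2)) with hC
  have hitems : d.items =
      (PySem.Set.ofList (l.map pvNormalize)).map (fun k => (k, d.getD k ("", ""))) := by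
    rw [hd, PySem.Dict.items_eq_map_keys _ (pvBuild_keys_nodup l) ("", ""), pvBuild_keys]
  -- description of each key's entry: (first of its group, minimum of its group)
  have hkey : ∀ k ∈ PySem.Set.ofList (l.map pvNormalize),
      ∃ mn, (d.getD k ("", "")).2 = mn ∧ mn ∈ pvGroup l k ∧ ∀ g ∈ pvGroup l k, mn ≤ g := by
    intro k hk
    rw [PySem.Set.mem_ofList, List.mem_map] at hk
    obtain ⟨n, hn, rfl⟩ := hk
    have hne : pvGroup l (pvNormalize n) ≠ [] := by
      intro h
      have : n ∈ pvGroup l (pvNormalize n) := (pvGroup_mem _ _ _).mpr ⟨hn, rfl⟩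
      simp [h] at this
    obtain ⟨g₀, grest, hg, hget⟩ := pvKey_info l (pvNormalize n) hne
    refine ⟨grest.foldl min g₀, ?_, ?_, ?_⟩
    · rw [hd, PySem.Dict.getD_eq_get?_getD, hget]
      rfl
    · rw [hg]
      rcases PySem.List.foldl_min_mem grest g₀ with h | h
      · simp [h]
      · simp [h]
    · rw [hg]
      intro g hgm
      rcases List.mem_cons.mp hgm with rfl | hgm
      · exact (PySem.List.foldl_min_le grest g).1
      · exact (PySem.List.foldl_min_le grest g₀).2 g hgm
  -- a group member that is minimal gives a candidate pair of A
  have hCP : ∀ k, pvRel nr k = true → ∀ mn ∈ pvGroup l k, (k, mn) ∈ pvCands nr l := by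
    intro k hrel mn hmn
    obtain ⟨hml, hnorm⟩ := (pvGroup_mem _ _ _).mp hmn
    exact (pvCands_mem _ _ _).mpr ⟨mn, hml, by rw [hnorm]; exact hrel, by rw [hnorm]⟩
  -- membership in the grouped candidate list
  have hCiff : ∀ c, c ∈ C ↔ ∃ k ∈ PySem.Set.ofList (l.map pvNormalize),
      pvRel nr k = true ∧ c = (k.length, (d.getD k ("", "")).2) := by
    intro c
    rw [hC]
    simp only [List.mem_map, List.mem_filter, hitems]
    constructor
    · rintro ⟨p, ⟨⟨k, hk, rfl⟩, hrel⟩, rfl⟩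
      exact ⟨k, hk, hrel, rfl⟩
    · rintro ⟨k, hk, hrel, rfl⟩
      exact ⟨(k, d.getD k ("", "")), ⟨⟨k, hk, rfl⟩, hrel⟩, rfl⟩
  cases hP : PySem.List.min2? (pvCands nr l) (fun p => p.1.length) (fun p => p.2) with
  | none =>
    -- no candidates at all: every key is unrelated, so the grouped list is empty too
    have hPnil : pvCands nr l = [] := (pvMin2_eq_none_iff _ _ _).mp hP
    have hCnil : C = [] := by
      rw [List.eq_nil_iff_forall_not_mem]
      intro c hc
      obtain ⟨k, hk, hrel, _⟩ := (hCiff c).mp hc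
      obtain ⟨mn, _, hmem, _⟩ := hkey k hk
      have := hCP k hrel mn hmem
      rw [hPnil] at this
      simp at this
    rw [hCnil, pvMin2_nil]
  | some m =>
    obtain ⟨hmem, hmin⟩ := pvMin2_spec _ _ _ _ hP
    obtain ⟨a, hal, harel, hm⟩ := (pvCands_mem _ _ _).mp hmem
    subst hm
    -- the witness key: pvNormalize a, whose group minimum is a itself
    have hkmem : pvNormalize a ∈ PySem.Set.ofList (l.map pvNormalize) := by
      rw [PySem.Set.mem_ofList]
      exact List.mem_map_of_mem hal
    obtain ⟨mn, hgetD, hmnmem, hmnle⟩ := hkey _ hkmem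
    have hamem : a ∈ pvGroup l (pvNormalize a) := (pvGroup_mem _ _ _).mpr ⟨hal, rfl⟩
    have hmn_eq : mn = a := by
      have h1 : mn ≤ a := hmnle a hamem
      have h2 : a ≤ mn := by
        rcases hmin _ (hCP _ harel mn hmnmem) with h | ⟨_, h⟩
        · simp at h
        · exact h
      exact le_antisymm h1 h2
    -- the grouped list contains ((pvNormalize a).length, a), it is minimal and unique on its key
    have hcstar : ((pvNormalize a).length, a) ∈ C :=
      (hCiff _).mpr ⟨pvNormalize a, hkmem, harel, by rw [hgetD, hmn_eq]⟩
    have hCmin : ∀ c ∈ C, pvLe Prod.fst Prod.snd ((pvNormalize a).length, a) c := by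
      intro c hc
      obtain ⟨k, hk, hrel, hck⟩ := (hCiff c).mp hc
      obtain ⟨mn', hgetD', hmn'mem, _⟩ := hkey k hk
      rcases hmin _ (hCP _ hrel mn' hmn'mem) with h | ⟨h, h'⟩
      · exact Or.inl (by rw [hck, hgetD']; exact h)
      · exact Or.inr ⟨by rw [hck]; exact h, by rw [hck, hgetD']; exact h'⟩
    have hCuniq : ∀ c ∈ C, c.1 = ((pvNormalize a).length, a).1 → c.2 = ((pvNormalize a).length, a).2 →
        c = ((pvNormalize a).length, a) := by
      intro c hc _ h2
      obtain ⟨k, hk, hrel, hck⟩ := (hCiff c).mp hc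
      obtain ⟨mn', hgetD', hmn'mem, _⟩ := hkey k hk
      have hmn'a : mn' = a := by
        rw [hck] at h2
        simpa [hgetD'] using h2
      have hknorm : pvNormalize mn' = k := ((pvGroup_mem _ _ _).mp hmn'mem).2
      have hkk : k = pvNormalize a := by rw [← hknorm, hmn'a]
      rw [hck, hgetD', hkk, hmn'a]
    rw [pvMin2_eq_of _ _ _ _ hcstar hCmin hCuniq]

-- ===== VERDICT (by name: the statement is the Claim_ definition above) =====
theorem select_manifest_model_py_spec : Claim_equal_select_manifest_model_py := by
  intro requested available _
  unfold Spec_select_manifest_model_py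
  rw [select_manifest_model_py, pvALoop_eq]
  simp only [List.nil_append, select_manifest_model_py_alt]
  cases hf : available.find? (fun n => decide (pvNormalize n = pvNormalize requested)) with
  | some n =>
    have hhead : (pvGroup available (pvNormalize requested)).head? = some n := by
      rw [pvGroup, List.head?_filter]
      exact hf
    have hget : (available.foldl pvStep PySem.Dict.empty).get? (pvNormalize requested) =
        some (n, ((pvGroup available (pvNormalize requested)).tail).foldl min n) := by
      rw [pvBuild_get?, PySem.Dict.get?_empty]
      cases hg : pvGroup available (pvNormalize requested) with
      | nil => rw [hg] at hhead; simp at hhead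
      | cons g₀ rest =>
        rw [hg] at hhead
        simp only [List.head?_cons, Option.some.injEq] at hhead
        subst hhead
        rfl
    rw [hget]
  | none =>
    have hhead : (pvGroup available (pvNormalize requested)).head? = none := by
      rw [pvGroup, List.head?_filter]
      exact hf
    have hgnil : pvGroup available (pvNormalize requested) = [] :=
      List.head?_eq_none_iff.mp hhead
    have hget : (available.foldl pvStep PySem.Dict.empty).get? (pvNormalize requested) = none := by
      rw [pvBuild_get?, PySem.Dict.get?_empty, hgnil]
    rw [hget]
    exact pvElse_eq (pvNormalize requested) available
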